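-- pv_equiv track=rewrite | github.com/YevhenFomichov/Two_models_1 | utilities/analysis.py | analyse_actuations
-- ===== SOURCE A (Python) =====
-- def analyse_actuations(list_of_predictions, max_samples_between_groups=16000, min_samples_in_group=3):
--     # Sort index pairs based on the start index
--     list_of_predictions = [tuple(prediction) for prediction in list_of_predictions]
--     list_of_predictions.sort()
--     groups = []
--     current_group = []
--
--     for i, pair in enumerate(list_of_predictions):
--         if not current_group:
--             # Start a new group if the current group is empty
--             current_group.append(pair)
--         else:
--             # Compare current pair with the last pair in the current group
--             if pair[0] - current_group[-1][1] <= max_samples_between_groups: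
--                 # If within max_samples_between_groups, add to the current group
--                 current_group.append(pair)
--             else:
--                 # If more than max_samples_between_groups apart, finish the current group
--                 if len(current_group) >= min_samples_in_group:
--                     groups.append([current_group[0][0], current_group[-1][1]])
--                 current_group = [pair]
--
--     # Check for the last group after the loop
--     if len(current_group) >= min_samples_in_group:
--         groups.append([current_group[0][0], current_group[-1][1]])
--
--     return groups
-- ===== SOURCE B (Python) =====
-- def analyse_actuations(list_of_predictions, max_samples_between_groups=16000, min_samples_in_group=3):
--     preds = sorted(tuple(p) for p in list_of_predictions)
--     n = len(preds)
--     # pass 1: cut positions — every index whose pair starts too far after its predecessor's end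
--     cuts = [0] + [i for i in range(1, n) if preds[i][0] - preds[i - 1][1] > max_samples_between_groups] + [n]
--     # pass 2: each adjacent cut pair (a, b) delimits one segment preds[a:b]
--     return [[preds[a][0], preds[b - 1][1]]
--             for a, b in zip(cuts, cuts[1:])
--             if b - a >= min_samples_in_group]
-- ===== Notes on version B (the rewrite author's own statement) =====
-- stated objective: alternative
-- what changed: A builds groups in one stateful pass with a growing current_group buffer and inline emission; B is staged: it first computes the list of break indices where the gap exceeds the threshold, then zips adjacent cut positions into segments and emits [start,end] per large-enough segment by index arithmetic.
import Mathlib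
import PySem

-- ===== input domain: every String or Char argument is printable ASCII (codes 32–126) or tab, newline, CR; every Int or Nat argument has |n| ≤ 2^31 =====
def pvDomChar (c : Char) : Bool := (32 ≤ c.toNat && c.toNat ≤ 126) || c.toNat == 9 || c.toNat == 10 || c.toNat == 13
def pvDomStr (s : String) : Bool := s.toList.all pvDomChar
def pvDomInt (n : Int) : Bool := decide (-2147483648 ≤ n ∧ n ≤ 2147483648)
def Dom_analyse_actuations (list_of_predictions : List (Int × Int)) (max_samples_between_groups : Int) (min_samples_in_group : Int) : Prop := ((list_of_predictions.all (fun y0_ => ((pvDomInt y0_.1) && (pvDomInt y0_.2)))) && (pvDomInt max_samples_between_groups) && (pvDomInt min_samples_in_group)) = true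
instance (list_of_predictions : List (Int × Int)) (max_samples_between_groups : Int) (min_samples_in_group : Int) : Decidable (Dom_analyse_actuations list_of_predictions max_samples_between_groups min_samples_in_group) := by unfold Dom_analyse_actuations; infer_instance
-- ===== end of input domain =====

-- B replaces A's single accumulating pass by a staged decomposition: first compute the list of
-- cut indices where the gap exceeds the threshold, then emit [start,end] per large-enough segment
-- delimited by adjacent cuts (alternative decomposition, same cost).


-- ===== PORT A =====
def analyse_actuations (list_of_predictions : List (Int × Int)) (max_samples_between_groups : Int) (min_samples_in_group : Int) : List (List Int) :=
  let sortedPreds := PySem.List.sorted2 list_of_predictions Prod.fst Prod.snd false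
  let st := sortedPreds.foldl (fun (st : List (List Int) × List (Int × Int)) pair =>
      if st.2 = [] then (st.1, st.2 ++ [pair])
      else if pair.1 - (st.2.getLast!).2 ≤ max_samples_between_groups then (st.1, st.2 ++ [pair])
      else if min_samples_in_group ≤ (st.2.length : Int) then
        (st.1 ++ [[st.2.head!.1, st.2.getLast!.2]], [pair])
      else (st.1, [pair])) ([], [])
  if min_samples_in_group ≤ (st.2.length : Int) then st.1 ++ [[st.2.head!.1, st.2.getLast!.2]]
  else st.1

-- ===== PORT B =====
def analyse_actuations_alt (list_of_predictions : List (Int × Int)) (max_samples_between_groups : Int) (min_samples_in_group : Int) : List (List Int) :=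
  let preds := PySem.List.sorted2 list_of_predictions Prod.fst Prod.snd false
  let n : Int := (preds.length : Int)
  -- pass 1: cut positions — every index whose pair starts too far after its predecessor's end
  let cuts : List Int :=
    [0] ++ (PySem.List.pyRange 1 n 1).filter
      (fun i => decide (max_samples_between_groups <
        (PySem.List.pyGetD preds i (0, 0)).1 - (PySem.List.pyGetD preds (i - 1) (0, 0)).2)) ++ [n]
  -- pass 2: each adjacent cut pair (a, b) delimits one segment preds[a:b]
  ((cuts.zip cuts.tail).filter (fun ab => decide (min_samples_in_group ≤ ab.2 - ab.1))).map
    (fun ab => [(PySem.List.pyGetD preds ab.1 (0, 0)).1,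
                (PySem.List.pyGetD preds (ab.2 - 1) (0, 0)).2])

-- ===== PRECONDITION & SPEC =====
-- Pre_ excludes only the inputs on which BOTH A and B raise IndexError: the empty list together
-- with min_samples_in_group ≤ 0 (A indexes the empty current_group; B indexes the empty preds).
def Pre_analyse_actuations (list_of_predictions : List (Int × Int)) (max_samples_between_groups : Int) (min_samples_in_group : Int) : Prop :=
  list_of_predictions ≠ [] ∨ 1 ≤ min_samples_in_group
instance (list_of_predictions : List (Int × Int)) (max_samples_between_groups : Int) (min_samples_in_group : Int) : Decidable (Pre_analyse_actuations list_of_predictions max_samples_between_groups min_samples_in_group) := by unfold Pre_analyse_actuations; infer_instance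

def pvWitness_analyse_actuations : (List (Int × Int)) × Int × Int := ([(0, 5), (10, 12), (100, 110)], 16000, 3)

def Spec_analyse_actuations (list_of_predictions : List (Int × Int)) (max_samples_between_groups : Int) (min_samples_in_group : Int) (out : List (List Int)) : Prop := out = analyse_actuations_alt list_of_predictions max_samples_between_groups min_samples_in_group
instance (list_of_predictions : List (Int × Int)) (max_samples_between_groups : Int) (min_samples_in_group : Int) (out : List (List Int)) : Decidable (Spec_analyse_actuations list_of_predictions max_samples_between_groups min_samples_in_group out) := by unfold Spec_analyse_actuations; infer_instance

-- ===== CLAIM (what is proved, stated in full; the proofs are below) =====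
def Claim_equal_analyse_actuations : Prop := ∀ (list_of_predictions : List (Int × Int)) (max_samples_between_groups : Int) (min_samples_in_group : Int), Dom_analyse_actuations list_of_predictions max_samples_between_groups min_samples_in_group → Pre_analyse_actuations list_of_predictions max_samples_between_groups min_samples_in_group → Spec_analyse_actuations list_of_predictions max_samples_between_groups min_samples_in_group (analyse_actuations list_of_predictions max_samples_between_groups min_samples_in_group)

-- ===== LEMMAS AND PROOFS =====

-- ---- common reference form: segment-at-a-time recursion ----

-- maximal run of pairs chained to their immediate predecessor; returns (run, remaining suffix)
def pvTakeRun (mx : Int) (prev : Int × Int) : List (Int × Int) → List (Int × Int) × List (Int × Int)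
  | [] => ([], [])
  | q :: rest =>
    if q.1 - prev.2 ≤ mx then
      let pr := pvTakeRun mx q rest
      (q :: pr.1, pr.2)
    else ([], q :: rest)

theorem pvTakeRun_snd_length (mx : Int) (prev : Int × Int) (l : List (Int × Int)) :
    (pvTakeRun mx prev l).2.length ≤ l.length := by
  induction l generalizing prev with
  | nil => simp [pvTakeRun]
  | cons q rest ih =>
    simp only [pvTakeRun]
    split
    · exact (ih q).trans (Nat.le_succ _)
    · simp

-- segment-at-a-time recursion producing the groups
def pvRuns (mx mn : Int) : List (Int × Int) → List (List Int)
  | [] => []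
  | p :: rest =>
    let pr := pvTakeRun mx p rest
    (if mn ≤ (1 + pr.1.length : Int) then [[p.1, ((p :: pr.1).getLast!).2]] else []) ++
      pvRuns mx mn pr.2
termination_by l => l.length
decreasing_by
  exact Nat.lt_succ_of_le (pvTakeRun_snd_length mx p rest)

-- ---- A-side: A's loop equals pvRuns ----

def loopA (mx mn : Int) (cur : List (Int × Int)) : List (Int × Int) → List (List Int)
  | [] => if mn ≤ (cur.length : Int) then [[cur.head!.1, cur.getLast!.2]] else []
  | p :: rest =>
    if p.1 - cur.getLast!.2 ≤ mx then loopA mx mn (cur ++ [p]) rest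
    else (if mn ≤ (cur.length : Int) then [[cur.head!.1, cur.getLast!.2]] else []) ++
      loopA mx mn [p] rest

theorem getLast!_concat (xs : List (Int × Int)) (y : Int × Int) : (xs ++ [y]).getLast! = y := by
  induction xs with
  | nil => rfl
  | cons a as ih =>
    cases as with
    | nil => rfl
    | cons b bs => simpa using ih

theorem foldl_eq_loopA (mx mn : Int) (l : List (Int × Int)) :
    ∀ (groups : List (List Int)) (cur : List (Int × Int)), cur ≠ [] →
    (let st := l.foldl (fun (st : List (List Int) × List (Int × Int)) pair =>
        if st.2 = [] then (st.1, st.2 ++ [pair])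
        else if pair.1 - (st.2.getLast!).2 ≤ mx then (st.1, st.2 ++ [pair])
        else if mn ≤ (st.2.length : Int) then
          (st.1 ++ [[st.2.head!.1, st.2.getLast!.2]], [pair])
        else (st.1, [pair])) (groups, cur)
     if mn ≤ (st.2.length : Int) then st.1 ++ [[st.2.head!.1, st.2.getLast!.2]] else st.1)
    = groups ++ loopA mx mn cur l := by
  induction l with
  | nil =>
    intro groups cur hcur
    simp only [List.foldl_nil, loopA]
    split <;> simp
  | cons p rest ih =>
    intro groups cur hcur
    simp only [List.foldl_cons, loopA, if_neg hcur]
    by_cases h1 : p.1 - cur.getLast!.2 ≤ mx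
    · simp only [if_pos h1]
      exact ih groups (cur ++ [p]) (by simp)
    · simp only [if_neg h1]
      by_cases h2 : mn ≤ (cur.length : Int)
      · simp only [if_pos h2]
        rw [ih (groups ++ [[cur.head!.1, cur.getLast!.2]]) [p] (by simp)]
        simp
      · simp only [if_neg h2]
        rw [ih groups [p] (by simp)]
        simp

theorem loopA_eq_runs (mx mn : Int) (l : List (Int × Int)) :
    ∀ (cur : List (Int × Int)), cur ≠ [] →
    loopA mx mn cur l =
      (if mn ≤ ((cur.length : Int) + ((pvTakeRun mx cur.getLast! l).1.length : Int)) then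
        [[cur.head!.1, ((cur ++ (pvTakeRun mx cur.getLast! l).1).getLast!).2]] else []) ++
      pvRuns mx mn (pvTakeRun mx cur.getLast! l).2 := by
  induction l with
  | nil =>
    intro cur hcur
    simp [loopA, pvTakeRun, pvRuns]
  | cons q rest ih =>
    intro cur hcur
    simp only [loopA, pvTakeRun]
    by_cases h1 : q.1 - cur.getLast!.2 ≤ mx
    · simp only [if_pos h1]
      rw [ih (cur ++ [q]) (by simp)]
      rw [getLast!_concat]
      have hlen : ((cur ++ [q]).length : Int) + ((pvTakeRun mx q rest).1.length : Int)
          = (cur.length : Int) + ((q :: (pvTakeRun mx q rest).1).length : Int) := by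
        simp; omega
      have hhead : (cur ++ [q]).head! = cur.head! := by
        cases cur with
        | nil => exact absurd rfl hcur
        | cons a cs => simp
      rw [hlen, hhead, List.append_assoc]
      simp
    · simp only [if_neg h1]
      have : pvRuns mx mn (q :: rest) =
          (if mn ≤ (1 + ((pvTakeRun mx q rest).1.length : Int)) then
            [[q.1, ((q :: (pvTakeRun mx q rest).1).getLast!).2]] else []) ++
          pvRuns mx mn (pvTakeRun mx q rest).2 := by
        simp only [pvRuns]
      rw [ih [q] (by simp)]
      rw [this]
      simp only [List.length_cons, List.length_nil, List.singleton_append]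
      norm_num

theorem sorted2_nil_of_nil {l : List (Int × Int)}
    (h : PySem.List.sorted2 l Prod.fst Prod.snd false = []) : l = [] := by
  have := PySem.List.sorted2_perm (xs := l) (k1 := Prod.fst) (k2 := Prod.snd) (rev := false)
  rw [h] at this
  exact (this.symm.eq_nil)

theorem A_eq_runs (l : List (Int × Int)) (mx mn : Int) (p : Int × Int) (rest : List (Int × Int))
    (hs : PySem.List.sorted2 l Prod.fst Prod.snd false = p :: rest) :
    analyse_actuations l mx mn = pvRuns mx mn (p :: rest) := by
  unfold analyse_actuations
  rw [hs]
  simp only [List.foldl_cons, if_true, List.nil_append]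
  rw [foldl_eq_loopA mx mn rest [] [p] (by simp)]
  rw [loopA_eq_runs mx mn rest [p] (by simp)]
  simp only [pvRuns, List.length_cons, List.length_nil, List.singleton_append]
  norm_num

-- ---- B-side: Nat-indexed reference form of the cuts computation ----

def pvGaps (mx : Int) (s : List (Int × Int)) : List Nat :=
  (List.range' 1 (s.length - 1)).filter
    (fun i => decide (mx < (s.getD i (0, 0)).1 - (s.getD (i - 1) (0, 0)).2))

def pvCuts (mx : Int) (s : List (Int × Int)) : List Nat :=
  0 :: (pvGaps mx s ++ [s.length])

def pvOutN (mx mn : Int) (s : List (Int × Int)) : List (List Int) :=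
  (((pvCuts mx s).zip (pvCuts mx s).tail).filter
      (fun ab => decide (mn ≤ (ab.2 : Int) - (ab.1 : Int)))).map
    (fun ab => [(s.getD ab.1 (0, 0)).1, (s.getD (ab.2 - 1) (0, 0)).2])

theorem pvGaps_ge_one (mx : Int) (s : List (Int × Int)) : ∀ i ∈ pvGaps mx s, 1 ≤ i := by
  intro i hi
  have := (List.mem_filter.1 hi).1
  have := List.mem_range'.1 this
  omega

-- pvTakeRun structural facts
theorem pvTakeRun_append (mx : Int) (prev : Int × Int) (l : List (Int × Int)) :
    (pvTakeRun mx prev l).1 ++ (pvTakeRun mx prev l).2 = l := by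
  induction l generalizing prev with
  | nil => simp [pvTakeRun]
  | cons q rest ih =>
    simp only [pvTakeRun]
    split
    · simpa using ih q
    · simp

theorem pvTakeRun_chain (mx : Int) (prev : Int × Int) (l : List (Int × Int)) :
    (prev :: (pvTakeRun mx prev l).1).IsChain (fun a b => b.1 - a.2 ≤ mx) := by
  induction l generalizing prev with
  | nil => simp [pvTakeRun]
  | cons q rest ih =>
    simp only [pvTakeRun]
    split
    · rename_i hq
      refine List.isChain_cons.2 ⟨?_, ih q⟩
      intro b hb
      simp only [List.head?_cons, Option.mem_def, Option.some.injEq] at hb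
      subst hb; exact hq
    · simp

theorem pvTakeRun_boundary (mx : Int) (prev : Int × Int) (l : List (Int × Int))
    (q : Int × Int) (t : List (Int × Int)) (h : (pvTakeRun mx prev l).2 = q :: t) :
    mx < q.1 - ((prev :: (pvTakeRun mx prev l).1).getLast (by simp)).2 := by
  induction l generalizing prev with
  | nil => simp [pvTakeRun] at h
  | cons r rest ih =>
    by_cases hr : r.1 - prev.2 ≤ mx
    · have h2 : (pvTakeRun mx r rest).2 = q :: t := by
        simpa [pvTakeRun, hr] using h
      have := ih r h2
      simpa [pvTakeRun, hr, List.getLast_cons] using this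
    · simp only [pvTakeRun, if_neg hr] at h ⊢
      cases h
      simpa using by omega

theorem getD_append_left (seg suffix : List (Int × Int)) (i : Nat) (h : i < seg.length) :
    (seg ++ suffix).getD i (0,0) = seg.getD i (0,0) := by
  simp [List.getD_eq_getElem?_getD, List.getElem?_append_left h]

theorem getD_append_right (seg suffix : List (Int × Int)) (i : Nat) (h : seg.length ≤ i) :
    (seg ++ suffix).getD i (0,0) = suffix.getD (i - seg.length) (0,0) := by
  simp [List.getD_eq_getElem?_getD, List.getElem?_append_right h]

theorem chain_gap (mx : Int) (seg : List (Int × Int))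
    (hchain : seg.IsChain (fun a b => b.1 - a.2 ≤ mx)) (i : Nat) (h1 : 1 ≤ i) (h2 : i < seg.length) :
    (seg.getD i (0,0)).1 - (seg.getD (i-1) (0,0)).2 ≤ mx := by
  have := (List.isChain_iff_getElem.1 hchain) (i-1) (by omega)
  rw [List.getD_eq_getElem?_getD, List.getD_eq_getElem?_getD,
      List.getElem?_eq_getElem (by omega : i < seg.length),
      List.getElem?_eq_getElem (by omega : i - 1 < seg.length)]
  simpa [Nat.sub_add_cancel h1] using this

theorem gaps_decomp (mx : Int) (seg suffix : List (Int × Int)) (hseg : seg ≠ [])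
    (hchain : seg.IsChain (fun a b => b.1 - a.2 ≤ mx))
    (hbound : ∀ q t, suffix = q :: t → mx < q.1 - (seg.getLast hseg).2) :
    pvGaps mx (seg ++ suffix) =
      if suffix = [] then [] else seg.length :: (pvGaps mx suffix).map (· + seg.length) := by
  have hk : 1 ≤ seg.length := by
    cases seg with | nil => exact absurd rfl hseg | cons _ _ => simp
  have hfirst : ∀ i ∈ List.range' 1 (seg.length - 1),
      ¬ (decide (mx < ((seg ++ suffix).getD i (0, 0)).1 - ((seg ++ suffix).getD (i - 1) (0, 0)).2) = true) := by
    intro i hi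
    have hm := List.mem_range'.1 hi
    rw [getD_append_left _ _ _ (by omega), getD_append_left _ _ _ (by omega)]
    simpa using chain_gap mx seg hchain i (by omega) (by omega)
  cases suffix with
  | nil =>
    simp only [List.append_nil] at hfirst ⊢
    simp only [pvGaps]
    exact List.filter_eq_nil_iff.2 hfirst
  | cons q t =>
    have hb := hbound q t rfl
    have hlen : (seg ++ q :: t).length - 1 = (seg.length - 1) + (1 + t.length) := by
      simp only [List.length_append, List.length_cons]; omega
    have hsplit : List.range' 1 ((seg ++ q :: t).length - 1)
        = List.range' 1 (seg.length - 1) ++ List.range' seg.length (1 + t.length) := by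
      have h := List.range'_append (s := 1) (m := seg.length - 1) (n := 1 + t.length) (step := 1)
      have he : 1 + 1 * (seg.length - 1) = seg.length := by omega
      rw [he] at h
      rw [hlen, ← h]
    simp only [pvGaps, hsplit, List.filter_append, if_neg (by simp : ¬ (q :: t = []))]
    rw [List.filter_eq_nil_iff.2 hfirst, List.nil_append]
    rw [show List.range' seg.length (1 + t.length) = seg.length :: List.range' (seg.length + 1) t.length by
      rw [Nat.add_comm 1 t.length, List.range'_succ]]
    rw [List.filter_cons_of_pos]
    swap
    · rw [getD_append_right _ _ _ (by omega), getD_append_left _ _ _ (by omega)]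
      simp only [Nat.sub_self]
      have : seg.getD (seg.length - 1) (0,0) = seg.getLast hseg := by
        rw [List.getLast_eq_getElem, List.getD_eq_getElem?_getD,
            List.getElem?_eq_getElem (by omega)]
        simp
      rw [this]
      simpa using hb
    congr 1
    -- tail part
    have h1 : List.range' (seg.length + 1) t.length
        = (List.range' 1 t.length).map (· + seg.length) := by
      rw [List.range'_eq_map_range, List.range'_eq_map_range, List.map_map]
      exact List.map_congr_left (fun x _ => by simp; omega)
    simp only [List.length_cons, Nat.add_sub_cancel]
    rw [h1, List.filter_map]
    congr 1
    apply List.filter_congr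
    intro i hi
    have hm := List.mem_range'.1 hi
    simp only [Function.comp]
    rw [getD_append_right _ _ _ (by omega), getD_append_right _ _ _ (by omega)]
    have e1 : i + seg.length - seg.length = i := by omega
    have e2 : i + seg.length - 1 - seg.length = i - 1 := by omega
    rw [e1, e2]

theorem outN_decomp (mx mn : Int) (seg suffix : List (Int × Int)) (hseg : seg ≠ [])
    (hchain : seg.IsChain (fun a b => b.1 - a.2 ≤ mx))
    (hbound : ∀ q t, suffix = q :: t → mx < q.1 - (seg.getLast hseg).2) :
    pvOutN mx mn (seg ++ suffix) =
      (if mn ≤ (seg.length : Int) then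
        [[(seg.getD 0 (0, 0)).1, (seg.getD (seg.length - 1) (0, 0)).2]] else []) ++
      (if suffix = [] then [] else pvOutN mx mn suffix) := by
  have hk : 1 ≤ seg.length := by
    cases seg with | nil => exact absurd rfl hseg | cons _ _ => simp
  have hg := gaps_decomp mx seg suffix hseg hchain hbound
  cases suffix with
  | nil =>
    rw [if_pos rfl] at hg
    simp only [List.append_nil] at hg ⊢
    rw [if_pos trivial, List.append_nil]
    simp only [pvOutN, pvCuts, hg, List.nil_append, List.tail_cons, List.zip_cons_cons,
      List.zip_nil_right]
    rw [List.filter_cons]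
    by_cases hmn : mn ≤ (seg.length : Int)
    · rw [if_pos (by simpa using hmn), if_pos hmn]
      simp [List.filter]
    · rw [if_neg (by simpa using hmn), if_neg hmn]
      simp [List.filter]
  | cons q t =>
    rw [if_neg (show ¬(q :: t = []) by simp)] at hg
    rw [if_neg (show ¬(q :: t = []) by simp)]
    have hcuts : pvCuts mx (seg ++ q :: t)
        = 0 :: (pvCuts mx (q :: t)).map (· + seg.length) := by
      simp only [pvCuts, hg, List.length_append, List.length_cons, List.map_cons, List.map_append,
        List.cons_append]
      congr 2
      · omega
      · simp
        omega
    have hhead : (pvCuts mx (q :: t)).map (· + seg.length)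
        = seg.length :: ((pvCuts mx (q :: t)).tail).map (· + seg.length) := by
      simp [pvCuts]
    have hpairs : (pvCuts mx (seg ++ q :: t)).zip (pvCuts mx (seg ++ q :: t)).tail
        = (0, seg.length) :: (((pvCuts mx (q :: t)).zip (pvCuts mx (q :: t)).tail).map
            (fun ab => (ab.1 + seg.length, ab.2 + seg.length))) := by
      rw [hcuts, List.tail_cons, hhead, List.zip_cons_cons, ← hhead, List.zip_map]
      simp [Prod.map]
    have htail1 : ∀ b ∈ (pvCuts mx (q :: t)).tail, 1 ≤ b := by
      intro b hb
      simp only [pvCuts, List.tail_cons, List.mem_append, List.mem_singleton] at hb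
      rcases hb with h | h
      · exact pvGaps_ge_one mx _ b h
      · simp [h]
    have htailEq : List.map
          (fun ab => [((seg ++ q :: t).getD ab.1 (0, 0)).1, ((seg ++ q :: t).getD (ab.2 - 1) (0, 0)).2])
          (List.filter (fun ab => decide (mn ≤ (ab.2 : Int) - (ab.1 : Int)))
            (((pvCuts mx (q :: t)).zip (pvCuts mx (q :: t)).tail).map
              (fun ab => (ab.1 + seg.length, ab.2 + seg.length))))
        = pvOutN mx mn (q :: t) := by
      rw [List.filter_map, List.map_map]
      rw [List.filter_congr (q := fun ab => decide (mn ≤ (ab.2 : Int) - (ab.1 : Int)))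
        (fun ab _ => by
          simp only [Function.comp, decide_eq_decide]
          push_cast
          omega)]
      apply List.map_congr_left
      intro ab hab
      have hmem := (List.mem_filter.1 hab).1
      have hb2 : ab.2 ∈ (pvCuts mx (q :: t)).tail := (List.of_mem_zip (by simpa using hmem)).2
      have hb1 : 1 ≤ ab.2 := htail1 ab.2 hb2
      simp only [Function.comp]
      rw [getD_append_right _ _ _ (by omega), getD_append_right _ _ _ (by omega)]
      have e1 : ab.1 + seg.length - seg.length = ab.1 := by omega
      have e2 : ab.2 + seg.length - 1 - seg.length = ab.2 - 1 := by omega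
      rw [e1, e2]
    simp only [pvOutN] at htailEq ⊢
    rw [hpairs, List.filter_cons]
    by_cases hmn : mn ≤ (seg.length : Int)
    · rw [if_pos (by simpa using hmn), if_pos hmn]
      simp only [List.map_cons, List.singleton_append]
      refine List.cons_eq_cons.mpr ⟨?_, htailEq⟩
      rw [getD_append_left _ _ _ (by omega), getD_append_left _ _ _ (by omega)]
    · rw [if_neg (by simpa using hmn), if_neg hmn]
      simpa using htailEq

theorem getLast!_eq_getLast (l : List (Int × Int)) (h : l ≠ []) : l.getLast! = l.getLast h := by
  cases l with
  | nil => exact absurd rfl h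
  | cons a t => simp [List.getLast!]

theorem getD_last (l : List (Int × Int)) (h : l ≠ []) :
    l.getD (l.length - 1) (0, 0) = l.getLast! := by
  rw [getLast!_eq_getLast l h, List.getLast_eq_getElem, List.getD_eq_getElem?_getD,
    List.getElem?_eq_getElem (by cases l with | nil => exact absurd rfl h | cons _ _ => simp)]
  rfl

theorem runs_eq_outN (mx mn : Int) (s : List (Int × Int)) (hne : s ≠ []) :
    pvOutN mx mn s = pvRuns mx mn s := by
  induction hn : s.length using Nat.strong_induction_on generalizing s with
  | _ n ih =>
    cases s with
    | nil => exact absurd rfl hne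
    | cons p rest =>
      have hsplit : (p :: (pvTakeRun mx p rest).1) ++ (pvTakeRun mx p rest).2 = p :: rest := by
        simpa using pvTakeRun_append mx p rest
      have hlen2 := pvTakeRun_snd_length mx p rest
      have hdec := outN_decomp mx mn (p :: (pvTakeRun mx p rest).1) (pvTakeRun mx p rest).2
        (by simp) (pvTakeRun_chain mx p rest)
        (fun q t h => pvTakeRun_boundary mx p rest q t h)
      rw [hsplit] at hdec
      rw [hdec]
      have hrunseq : pvRuns mx mn (p :: rest) =
          (if mn ≤ (1 + ((pvTakeRun mx p rest).1.length : Int)) then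
            [[p.1, ((p :: (pvTakeRun mx p rest).1).getLast!).2]] else []) ++
          pvRuns mx mn (pvTakeRun mx p rest).2 := by
        simp only [pvRuns]
      rw [hrunseq]
      congr 1
      · by_cases hmn : mn ≤ (1 + ((pvTakeRun mx p rest).1.length : Int))
        · rw [if_pos hmn, if_pos (show mn ≤ (((p :: (pvTakeRun mx p rest).1).length : Nat) : Int) by
            simp only [List.length_cons]; push_cast; omega)]
          have h0 : (p :: (pvTakeRun mx p rest).1).getD 0 (0, 0) = p := rfl
          rw [h0, getD_last (p :: (pvTakeRun mx p rest).1) (by simp)]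
        · rw [if_neg hmn, if_neg (show ¬ mn ≤ (((p :: (pvTakeRun mx p rest).1).length : Nat) : Int) by
            simp only [List.length_cons]; push_cast; omega)]
      · cases hsuf : (pvTakeRun mx p rest).2 with
        | nil => rw [if_pos rfl]; simp [pvRuns]
        | cons a b =>
          rw [if_neg (by simp)]
          exact ih ((a :: b).length) (by rw [← hsuf, ← hn]; simp; omega) (a :: b) (by simp) rfl

theorem alt_eq_outN (l : List (Int × Int)) (mx mn : Int)
    (hne : PySem.List.sorted2 l Prod.fst Prod.snd false ≠ []) :
    analyse_actuations_alt l mx mn =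
      pvOutN mx mn (PySem.List.sorted2 l Prod.fst Prod.snd false) := by
  unfold analyse_actuations_alt
  dsimp only
  set s := PySem.List.sorted2 l Prod.fst Prod.snd false with hs
  have hL : 1 ≤ s.length := by
    cases hc : s with
    | nil => exact absurd hc hne
    | cons _ _ => simp
  -- step 1/2: the Int-valued cut-index list is the cast image of the Nat-valued one
  have hrange : PySem.List.pyRange 1 (s.length : Int)
      = (List.range' 1 (s.length - 1)).map (fun i : Nat => (i : Int)) := by
    rw [PySem.List.pyRange_one, List.range'_eq_map_range, List.map_map]
    have he : ((s.length : Int) - 1).toNat = s.length - 1 := by omega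
    rw [he]
    apply List.map_congr_left
    intro x _
    simp only [Function.comp]
    push_cast
    ring
  have hfilter : (PySem.List.pyRange 1 (s.length : Int)).filter
        (fun i => decide (mx < (PySem.List.pyGetD s i (0, 0)).1
          - (PySem.List.pyGetD s (i - 1) (0, 0)).2))
      = (pvGaps mx s).map (fun i : Nat => (i : Int)) := by
    rw [hrange, List.filter_map, pvGaps]
    congr 1
    apply List.filter_congr
    intro i hi
    have hm := List.mem_range'.1 hi
    simp only [Function.comp]
    have h1 : ((i : Int) - 1) = ((i - 1 : Nat) : Int) := by omega
    rw [h1, PySem.List.pyGetD_natCast, PySem.List.pyGetD_natCast]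
  have hcuts : ([0] ++ (PySem.List.pyRange 1 (s.length : Int)).filter
        (fun i => decide (mx < (PySem.List.pyGetD s i (0, 0)).1
          - (PySem.List.pyGetD s (i - 1) (0, 0)).2)) ++ [(s.length : Int)])
      = (pvCuts mx s).map (fun i : Nat => (i : Int)) := by
    rw [hfilter]
    simp [pvCuts]
  rw [hcuts]
  -- step 4: pairs of the cast list are the cast image of the Nat pairs
  have hpairs : ((pvCuts mx s).map (fun i : Nat => (i : Int))).zip
        ((pvCuts mx s).map (fun i : Nat => (i : Int))).tail
      = ((pvCuts mx s).zip (pvCuts mx s).tail).map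
          (Prod.map (fun i : Nat => (i : Int)) (fun i : Nat => (i : Int))) := by
    rw [← List.map_tail, List.zip_map]
  rw [hpairs, List.filter_map, List.map_map]
  -- step 5: the size filter is unchanged by the cast
  rw [List.filter_congr (q := fun ab => decide (mn ≤ (ab.2 : Int) - (ab.1 : Int)))
    (fun ab _ => by simp)]
  -- step 6: the emitted group is unchanged by the cast
  have htail1 : ∀ b ∈ (pvCuts mx s).tail, 1 ≤ b := by
    intro b hb
    simp only [pvCuts, List.tail_cons, List.mem_append, List.mem_singleton] at hb
    rcases hb with h | h
    · exact pvGaps_ge_one mx s b h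
    · omega
  unfold pvOutN
  apply List.map_congr_left
  intro ab hab
  have hmem := (List.mem_filter.1 hab).1
  have hb2 : ab.2 ∈ (pvCuts mx s).tail := (List.of_mem_zip (by simpa using hmem)).2
  have hb1 : 1 ≤ ab.2 := htail1 ab.2 hb2
  simp only [Function.comp, Prod.map_fst, Prod.map_snd]
  have h1 : ((ab.2 : Int) - 1) = ((ab.2 - 1 : Nat) : Int) := by omega
  rw [h1, PySem.List.pyGetD_natCast, PySem.List.pyGetD_natCast]

-- ===== VERDICT (by name: the statement is the Claim_ definition above) =====
theorem analyse_actuations_spec : Claim_equal_analyse_actuations := by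
  intro l mx mn _ hpre
  unfold Spec_analyse_actuations
  cases hs : PySem.List.sorted2 l Prod.fst Prod.snd false with
  | nil =>
    have hl : l = [] := sorted2_nil_of_nil hs
    have hmn : 1 ≤ mn := by
      rcases hpre with h | h
      · exact absurd hl h
      · exact h
    subst hl
    have hs0 : PySem.List.sorted2 ([] : List (Int × Int)) Prod.fst Prod.snd false = [] := hs
    unfold analyse_actuations analyse_actuations_alt
    rw [hs0]
    simp only [List.foldl_nil, List.length_nil, Nat.cast_zero]
    rw [if_neg (by omega)]
    simp [PySem.List.pyRange_one_eq_nil, List.zip, List.zipWith]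
    omega
  | cons p rest =>
    rw [A_eq_runs l mx mn p rest hs, alt_eq_outN l mx mn (by rw [hs]; simp)]
    rw [hs, runs_eq_outN mx mn (p :: rest) (by simp)]
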